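-- pv_equiv track=rewrite | github.com/tobiasspt/advent_of_code | 2023/Day08/day08.py | find_common_times
-- ===== SOURCE A (Python) =====
-- def find_common_times(times1: int, times2: int) -> list[int, int]:
--
--     delta1 = times1[1] - times1[0]
--     delta2 = times2[1] - times2[0]
--
--     if delta1 >= delta2:
--         start = times1[0]
--         delta = delta1
--         checkstart = times2[0]
--         checkdelta = delta2
--
--     elif delta2 > delta1:
--         start = times2[0]
--         delta = delta2
--         checkstart = times1[0]
--         checkdelta = delta1
--
--     else: # The ranges have the same time step
--         return
--
--     new_range = []
--     counter = 0
--     while len(new_range) < 2: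
--         guess = start + counter*delta
--         counter += 1
--         if not (guess-checkstart)%checkdelta:
--             new_range.append(guess)
--
--     return new_range
-- ===== SOURCE B (Python) =====
-- def _egcd(a, b):
--     # extended Euclid on nonnegative ints: returns (g, x, y) with a*x + b*y = g = gcd(a, b)
--     if a == 0:
--         return (b, 0, 1)
--     g, x, y = _egcd(b % a, a)
--     return (g, y - (b // a) * x, x)
--
--
-- def find_common_times(times1, times2):
--     delta1 = times1[1] - times1[0]
--     delta2 = times2[1] - times2[0]
--     if delta1 >= delta2:
--         start, delta, checkstart, checkdelta = times1[0], delta1, times2[0], delta2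
--     else:
--         start, delta, checkstart, checkdelta = times2[0], delta2, times1[0], delta1
--     # solve delta*k ≡ checkstart - start (mod |checkdelta|) for the two smallest k >= 0
--     m = abs(checkdelta)
--     c = checkstart - start
--     g, _, _ = _egcd(abs(delta), m)
--     ad, cd, p = delta // g, c // g, m // g
--     _, x, _ = _egcd(ad % p, p)
--     k0 = (cd * x) % p
--     return [start + k0 * delta, start + (k0 + p) * delta]
-- ===== Notes on version B (the rewrite author's own statement) =====
-- stated objective: faster
-- what changed: A scans the larger-step progression one term at a time testing divisibility until two matches appear; B solves the linear congruence delta*k = checkstart-start (mod checkdelta) with the extended Euclidean algorithm and returns the first match and the match one period later in closed form.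
import Mathlib
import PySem

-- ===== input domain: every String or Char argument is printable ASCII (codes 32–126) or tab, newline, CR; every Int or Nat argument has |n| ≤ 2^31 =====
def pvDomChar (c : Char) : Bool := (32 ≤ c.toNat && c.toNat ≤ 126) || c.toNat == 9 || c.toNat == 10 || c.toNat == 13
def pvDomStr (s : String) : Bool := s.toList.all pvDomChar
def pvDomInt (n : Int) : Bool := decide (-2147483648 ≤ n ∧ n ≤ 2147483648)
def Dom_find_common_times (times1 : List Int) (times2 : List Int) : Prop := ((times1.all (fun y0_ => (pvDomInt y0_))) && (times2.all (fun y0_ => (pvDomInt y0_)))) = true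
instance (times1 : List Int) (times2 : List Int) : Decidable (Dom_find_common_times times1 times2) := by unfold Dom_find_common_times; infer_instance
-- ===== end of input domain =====

-- B replaces A's unbounded linear scan of the larger-step progression by solving the
-- linear congruence delta*k ≡ checkstart-start (mod checkdelta) with the extended
-- Euclidean algorithm and stepping by the period.  (Equivalence of return values on Pre_.)

-- ===== PORT A =====
-- A's while loop: `while len(new_range) < 2: guess = start + counter*delta; counter += 1;
-- if not (guess-checkstart)%checkdelta: new_range.append(guess)`.  The loop is ported with
-- a fuel guard that only makes it total; on every input admitted by Pre_ the fuel
-- 2*|checkdelta|+2 is proved sufficient, so the guard never fires there.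
def pvLoopA (start delta checkstart checkdelta : Int) : Nat → Int → List Int → List Int
  | 0, _, acc => acc
  | fuel+1, counter, acc =>
    if acc.length < 2 then
      let guess := start + counter * delta
      if PySem.Int.mod (guess - checkstart) checkdelta = 0 then
        pvLoopA start delta checkstart checkdelta fuel (counter + 1) (acc ++ [guess])
      else
        pvLoopA start delta checkstart checkdelta fuel (counter + 1) acc
    else acc

def find_common_times (times1 : List Int) (times2 : List Int) : List Int :=
  match PySem.List.pyGet? times1 0, PySem.List.pyGet? times1 1,
        PySem.List.pyGet? times2 0, PySem.List.pyGet? times2 1 with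
  | some t10, some t11, some t20, some t21 =>
    let delta1 := t11 - t10
    let delta2 := t21 - t20
    if delta1 ≥ delta2 then
      pvLoopA t10 delta1 t20 delta2 (2 * delta2.natAbs + 2) 0 []
    else
      pvLoopA t20 delta2 t10 delta1 (2 * delta1.natAbs + 2) 0 []
  | _, _, _, _ => []    -- IndexError in Python (list shorter than 2); excluded by Pre_

-- ===== PORT B =====
-- Source B's `_egcd(a, b)` on nonnegative ints (for which Python's % and // agree with Nat's).
def pvEgcd : Nat → Nat → Int × Int × Int
  | 0, b => ((b : Int), 0, 1)
  | a+1, b =>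
    let r := pvEgcd (b % (a+1)) (a+1)
    (r.1, r.2.2 - ((b / (a+1) : Nat) : Int) * r.2.1, r.2.1)
  termination_by a _ => a
  decreasing_by exact Nat.lt_of_lt_of_le (Nat.mod_lt _ (Nat.succ_pos a)) (Nat.le_refl _)

-- Source B's congruence solver for the selected (start, delta, checkstart, checkdelta).
def pvSolve (start delta checkstart checkdelta : Int) : List Int :=
  let m : Int := |checkdelta|
  let c := checkstart - start
  let g := (pvEgcd delta.natAbs m.natAbs).1
  let ad := PySem.Int.floordiv delta g
  let cd := PySem.Int.floordiv c g
  let p := PySem.Int.floordiv m g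
  let x := (pvEgcd (PySem.Int.mod ad p).natAbs p.natAbs).2.1
  let k0 := PySem.Int.mod (cd * x) p
  [start + k0 * delta, start + (k0 + p) * delta]

def find_common_times_alt (times1 : List Int) (times2 : List Int) : List Int :=
  match PySem.List.pyGet? times1 0 with
  | none => []
  | some t10 =>
    match PySem.List.pyGet? times1 1 with
    | none => []
    | some t11 =>
      match PySem.List.pyGet? times2 0 with
      | none => []
      | some t20 =>
        match PySem.List.pyGet? times2 1 with
        | none => []
        | some t21 =>
          let delta1 := t11 - t10
          let delta2 := t21 - t20
          if delta1 ≥ delta2 then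
            pvSolve t10 delta1 t20 delta2
          else
            pvSolve t20 delta2 t10 delta1

-- ===== PRECONDITION & SPEC =====
-- Pre_ excludes exactly the inputs where the Python A does not return: a list shorter than
-- two (IndexError), checkdelta = 0 (ZeroDivisionError in `% checkdelta`), and the inputs
-- where the congruence delta*k ≡ checkstart-start (mod checkdelta) has no solution, on
-- which A's while loop never collects two values and diverges.
def Pre_find_common_times (times1 : List Int) (times2 : List Int) : Prop :=
  match times1, times2 with
  | t10 :: t11 :: _, t20 :: t21 :: _ =>
    let delta1 := t11 - t10
    let delta2 := t21 - t20
    if delta1 ≥ delta2 then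
      delta2 ≠ 0 ∧ (Int.gcd delta1 delta2 : Int) ∣ (t20 - t10)
    else
      delta1 ≠ 0 ∧ (Int.gcd delta2 delta1 : Int) ∣ (t10 - t20)
  | _, _ => False

instance (times1 : List Int) (times2 : List Int) : Decidable (Pre_find_common_times times1 times2) := by
  unfold Pre_find_common_times
  rcases times1 with _ | ⟨a, _ | ⟨b, t⟩⟩ <;> rcases times2 with _ | ⟨u, _ | ⟨v, s⟩⟩ <;> infer_instance

def pvWitness_find_common_times : List Int × List Int := ([0, 3], [1, 3])

def Spec_find_common_times (times1 : List Int) (times2 : List Int) (out : List Int) : Prop := out = find_common_times_alt times1 times2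
instance (times1 : List Int) (times2 : List Int) (out : List Int) : Decidable (Spec_find_common_times times1 times2 out) := by unfold Spec_find_common_times; infer_instance

-- ===== CLAIM (what is proved, stated in full; the proofs are below) =====
def Claim_equal_find_common_times : Prop := ∀ (times1 : List Int) (times2 : List Int), Dom_find_common_times times1 times2 → Pre_find_common_times times1 times2 → Spec_find_common_times times1 times2 (find_common_times times1 times2)

-- ===== LEMMAS AND PROOFS =====

-- Correctness of the extended Euclid port: gcd value and Bézout identity.
theorem pvEgcd_spec : ∀ a b : Nat,
    (pvEgcd a b).1 = (Nat.gcd a b : Int) ∧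
    (a : Int) * (pvEgcd a b).2.1 + (b : Int) * (pvEgcd a b).2.2 = (pvEgcd a b).1 := by
  intro a
  induction a using Nat.strong_induction_on with
  | _ a ih =>
    intro b
    match a with
    | 0 => simp [pvEgcd]
    | a + 1 =>
      have hlt : b % (a+1) < a+1 := Nat.mod_lt _ (Nat.succ_pos a)
      obtain ⟨hg, hbez⟩ := ih (b % (a+1)) hlt (a+1)
      have hdm : ((a : Int)+1) * ((b / (a+1) : Nat) : Int) + ((b % (a+1) : Nat) : Int) = (b : Int) := by
        exact_mod_cast congrArg (fun n : Nat => (n : Int)) (Nat.div_add_mod b (a+1))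
      rcases hrec : pvEgcd (b % (a+1)) (a+1) with ⟨g1, x1, y1⟩
      rw [hrec] at hg hbez
      rw [pvEgcd, hrec]
      simp only at hg hbez ⊢
      constructor
      · rw [hg, Nat.gcd_rec (a+1) b]
      · push_cast at hbez hdm ⊢
        linear_combination hbez - x1 * hdm

-- A's loop returns acc unchanged once two values are collected.
theorem pvLoopA_done (s d cs cd : Int) (fuel : Nat) (counter : Int) (acc : List Int)
    (h : 2 ≤ acc.length) :
    pvLoopA s d cs cd fuel counter acc = acc := by
  cases fuel with
  | zero => rfl
  | succ f => simp [pvLoopA]; omega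

-- Skipping n consecutive non-matching counters consumes n fuel.
theorem pvLoopA_skip (s d cs cd : Int) (n : Nat) : ∀ (fuel : Nat) (counter : Int) (acc : List Int),
    acc.length < 2 →
    (∀ i : Nat, i < n → ¬ cd ∣ (s + (counter + i) * d - cs)) →
    pvLoopA s d cs cd (n + fuel) counter acc = pvLoopA s d cs cd fuel (counter + n) acc := by
  induction n with
  | zero => intro fuel c acc _ _; simp
  | succ n ihn =>
    intro fuel counter acc hlen hno
    have h0 : ¬ cd ∣ (s + counter * d - cs) := by
      have := hno 0 (Nat.succ_pos n)
      simpa using this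
    have hstep : n + 1 + fuel = (n + fuel) + 1 := by omega
    rw [hstep]
    show pvLoopA s d cs cd ((n + fuel) + 1) counter acc = _
    rw [pvLoopA, if_pos hlen, if_neg (by
      rw [PySem.Int.mod_eq_zero_iff_dvd]; exact h0)]
    rw [ihn fuel (counter + 1) acc hlen (by
      intro i hi
      have := hno (i + 1) (by omega)
      push_cast at this ⊢
      convert this using 3
      ring)]
    congr 1
    push_cast
    ring

-- A matching counter appends its guess.
theorem pvLoopA_hit (s d cs cd : Int) (fuel : Nat) (counter : Int) (acc : List Int)
    (h : acc.length < 2) (hp : cd ∣ (s + counter * d - cs)) :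
    pvLoopA s d cs cd (fuel + 1) counter acc
      = pvLoopA s d cs cd fuel (counter + 1) (acc ++ [s + counter * d]) := by
  rw [pvLoopA, if_pos h, if_pos (by rw [PySem.Int.mod_eq_zero_iff_dvd]; exact hp)]

-- Closed form of A's loop when the matching counters are exactly k0 + p * ℤ.
theorem pvLoopA_closed (s d cs cd k0 p : Int) (fuel : Nat)
    (hp : 0 < p) (hk00 : 0 ≤ k0) (hk0p : k0 < p)
    (hchar : ∀ k : Int, cd ∣ (s + k * d - cs) ↔ p ∣ (k - k0))
    (hfuel : k0.toNat + p.toNat + 1 ≤ fuel) :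
    pvLoopA s d cs cd fuel 0 [] = [s + k0 * d, s + (k0 + p) * d] := by
  set k0n := k0.toNat with hk0n
  set pn := p.toNat with hpn
  have hk0c : (k0n : Int) = k0 := Int.toNat_of_nonneg hk00
  have hpc : (pn : Int) = p := Int.toNat_of_nonneg (le_of_lt hp)
  have hpn1 : 1 ≤ pn := by omega
  obtain ⟨f, hf⟩ : ∃ f, fuel = k0n + (1 + ((pn - 1) + (1 + f))) :=
    ⟨fuel - (k0n + pn + 1), by omega⟩
  subst hf
  -- skip the k0 non-matching counters
  rw [pvLoopA_skip s d cs cd k0n _ 0 [] (by simp) ?h1]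
  case h1 =>
    intro i hi
    rw [hchar]
    intro hdvd
    have hz := Int.eq_zero_of_dvd_of_natAbs_lt_natAbs hdvd (by omega)
    omega
  have ec : (0 : Int) + (k0n : Int) = k0 := by omega
  rw [ec, Nat.add_comm 1 ((pn - 1) + (1 + f))]
  -- first hit, at counter k0
  rw [pvLoopA_hit s d cs cd _ k0 [] (by simp) (by rw [hchar]; simp)]
  -- skip the pn - 1 counters strictly between k0 and k0 + p
  rw [pvLoopA_skip s d cs cd (pn - 1) _ (k0 + 1) _ (by simp) ?h2]
  case h2 =>
    intro i hi
    rw [hchar]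
    intro hdvd
    have hz := Int.eq_zero_of_dvd_of_natAbs_lt_natAbs hdvd (by omega)
    omega
  have ec2 : k0 + 1 + ((pn - 1 : Nat) : Int) = k0 + p := by
    have : ((pn - 1 : Nat) : Int) = p - 1 := by omega
    omega
  rw [ec2, Nat.add_comm 1 f]
  -- second hit, at counter k0 + p
  rw [pvLoopA_hit s d cs cd f (k0 + p) _ (by simp) (by rw [hchar]; simp)]
  rw [pvLoopA_done s d cs cd f _ _ (by simp)]
  simp

-- The heart: on the selected quadruple, A's scan equals B's congruence solution.
theorem pvCore (s d cs cd : Int) (hcd : cd ≠ 0)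
    (hsol : (Int.gcd d cd : Int) ∣ (cs - s)) :
    pvLoopA s d cs cd (2 * cd.natAbs + 2) 0 [] = pvSolve s d cs cd := by
  have hm : (0 : Int) < |cd| := abs_pos.mpr hcd
  set m : Int := |cd| with hmdef
  set c : Int := cs - s with hcdef
  obtain ⟨hg1, -⟩ := pvEgcd_spec d.natAbs m.natAbs
  have hnm : m.natAbs = cd.natAbs := by rw [hmdef, Int.natAbs_abs]
  set G : Int := (Int.gcd d m : Int) with hGdef
  have hg1' : (pvEgcd d.natAbs m.natAbs).1 = G := by rw [hg1]; rfl
  have hGm_cd : Int.gcd d m = Int.gcd d cd := by rw [Int.gcd_def, Int.gcd_def, hnm]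
  have hGposN : 0 < Int.gcd d m := Int.gcd_pos_of_ne_zero_right d (ne_of_gt hm)
  have hGpos : 0 < G := by rw [hGdef]; exact_mod_cast hGposN
  have hGd : G ∣ d := Int.gcd_dvd_left d m
  have hGm : G ∣ m := Int.gcd_dvd_right d m
  have hGc : G ∣ c := by rw [hGdef, hGm_cd]; exact hsol
  set ad : Int := d / G with had
  set cq : Int := c / G with hcq
  set p : Int := m / G with hpdef
  have hdad : ad * G = d := Int.ediv_mul_cancel hGd
  have hccq : cq * G = c := Int.ediv_mul_cancel hGc
  have hmp : p * G = m := Int.ediv_mul_cancel hGm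
  have hppos : 0 < p := by nlinarith
  have hcop : Int.gcd ad p = 1 := by
    exact Int.gcd_ediv_gcd_ediv_gcd (i := d) (j := m) hGposN
  set r : Int := ad % p with hrdef
  have hr0 : 0 ≤ r := Int.emod_nonneg ad (ne_of_gt hppos)
  obtain ⟨hg2, hbez2⟩ := pvEgcd_spec r.natAbs p.natAbs
  have hrc : (r.natAbs : Int) = r := Int.natAbs_of_nonneg hr0
  have hpc : (p.natAbs : Int) = p := Int.natAbs_of_nonneg (le_of_lt hppos)
  have hgr : Int.gcd r p = 1 := by
    have e : r = ad - (ad / p) * p := by rw [hrdef, Int.emod_def]; ring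
    rw [e, Int.gcd_sub_mul_right_left]
    exact hcop
  set x : Int := (pvEgcd r.natAbs p.natAbs).2.1 with hxdef
  set y : Int := (pvEgcd r.natAbs p.natAbs).2.2 with hydef
  have hbez : r * x + p * y = 1 := by
    have : (pvEgcd r.natAbs p.natAbs).1 = (1 : Int) := by
      rw [hg2]
      have : r.natAbs.gcd p.natAbs = Int.gcd r p := rfl
      rw [this, hgr]; rfl
    rw [this] at hbez2
    rw [hrc, hpc] at hbez2
    exact hbez2
  have hpr : p ∣ ad - r := by
    refine ⟨ad / p, ?_⟩
    rw [hrdef, Int.emod_def]; ring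
  have hpx : p ∣ ad * x - 1 := by
    have e : ad * x - 1 = (ad - r) * x + (r * x - 1) := by ring
    rw [e]
    exact dvd_add (Dvd.dvd.mul_right hpr x) ⟨-y, by linarith⟩
  set k0 : Int := (cq * x) % p with hk0def
  have hk00 : 0 ≤ k0 := Int.emod_nonneg _ (ne_of_gt hppos)
  have hk0p : k0 < p := Int.emod_lt_of_pos _ hppos
  have hk0c : p ∣ k0 - cq * x := by
    refine ⟨-((cq * x) / p), ?_⟩
    rw [hk0def, Int.emod_def]; ring
  have hmain : p ∣ ad * k0 - cq := by
    have e : ad * k0 - cq = ad * (k0 - cq * x) + cq * (ad * x - 1) := by ring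
    rw [e]
    exact dvd_add (Dvd.dvd.mul_left hk0c ad) (Dvd.dvd.mul_left hpx cq)
  have hchar : ∀ k : Int, cd ∣ (s + k * d - cs) ↔ p ∣ (k - k0) := by
    intro k
    have h1 : s + k * d - cs = (ad * k - cq) * G := by
      rw [show s + k * d - cs = k * d - c from by rw [hcdef]; ring, ← hdad, ← hccq]; ring
    have h2 : (cd ∣ (s + k * d - cs)) ↔ (p ∣ ad * k - cq) := by
      rw [← abs_dvd cd, ← hmdef, h1, ← hmp]
      exact mul_dvd_mul_iff_right (ne_of_gt hGpos)
    have h3 : (p ∣ ad * k - cq) ↔ (p ∣ ad * (k - k0)) := by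
      constructor
      · intro hh
        have h := dvd_sub hh hmain
        have e : ad * k - cq - (ad * k0 - cq) = ad * (k - k0) := by ring
        rwa [e] at h
      · intro hh
        have h := dvd_add hh hmain
        have e : ad * (k - k0) + (ad * k0 - cq) = ad * k - cq := by ring
        rwa [e] at h
    have h4 : (p ∣ ad * (k - k0)) ↔ (p ∣ k - k0) := by
      constructor
      · intro hh
        exact Int.dvd_of_dvd_mul_left_of_gcd_one (by rwa [mul_comm] at hh)
          (by rw [Int.gcd_comm]; exact hcop)
      · intro hh
        exact Dvd.dvd.mul_left hh ad
    rw [h2, h3, h4]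
  have hple : p ≤ m := by nlinarith
  have hfuel : k0.toNat + p.toNat + 1 ≤ 2 * cd.natAbs + 2 := by
    have e : m = (cd.natAbs : Int) := by rw [hmdef, Int.abs_eq_natAbs]
    omega
  rw [pvLoopA_closed s d cs cd k0 p _ hppos hk00 hk0p hchar hfuel]
  show _ = pvSolve s d cs cd
  rw [pvSolve]
  simp only [← hmdef, ← hcdef, hg1', PySem.Int.floordiv_eq_ediv_of_pos hGpos, ← had, ← hcq, ← hpdef,
    PySem.Int.mod_eq_emod_of_pos hppos, ← hrdef, ← hxdef, ← hk0def]

-- ===== VERDICT (by name: the statement is the Claim_ definition above) =====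
theorem find_common_times_spec : Claim_equal_find_common_times := by
  intro times1 times2 _ hpre
  unfold Spec_find_common_times
  rcases times1 with _ | ⟨t10, _ | ⟨t11, r1⟩⟩ <;> rcases times2 with _ | ⟨t20, _ | ⟨t21, r2⟩⟩ <;>
    try exact (hpre : False).elim
  have hpre2 : (if t11 - t10 ≥ t21 - t20
      then (t21 - t20 ≠ 0 ∧ (Int.gcd (t11 - t10) (t21 - t20) : Int) ∣ (t20 - t10))
      else (t11 - t10 ≠ 0 ∧ (Int.gcd (t21 - t20) (t11 - t10) : Int) ∣ (t10 - t20))) := hpre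
  have e10 : PySem.List.pyGet? (t10 :: t11 :: r1) 0 = some t10 := by simp
  have e11 : PySem.List.pyGet? (t10 :: t11 :: r1) 1 = some t11 := by simp
  have e20 : PySem.List.pyGet? (t20 :: t21 :: r2) 0 = some t20 := by simp
  have e21 : PySem.List.pyGet? (t20 :: t21 :: r2) 1 = some t21 := by simp
  simp only [find_common_times, find_common_times_alt, e10, e11, e20, e21]
  by_cases h : t11 - t10 ≥ t21 - t20
  · rw [if_pos h] at hpre2
    rw [if_pos h, if_pos h]
    exact pvCore t10 (t11 - t10) t20 (t21 - t20) hpre2.1 hpre2.2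
  · rw [if_neg h] at hpre2
    rw [if_neg h, if_neg h]
    exact pvCore t20 (t21 - t20) t10 (t11 - t10) hpre2.1 hpre2.2
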